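-- pv_equiv track=rewrite | github.com/chrisbcarl/chriscarl.tools.calculators | calculators/discrete.py | create_truth_value_arrays
-- ===== SOURCE A (Python) =====
-- from collections import OrderedDict
-- from typing import List, Dict, Optional, Tuple
--
-- T_TRUTH_TABLE = Dict[str, List[Optional[bool]]]
--
-- def create_truth_value_arrays(propositions):
--     # type: (List[str]) -> Tuple[T_TRUTH_TABLE, int]
--     power = len(propositions)
--     total_truth_values = 2**power
--     truth_table: T_TRUTH_TABLE = OrderedDict()  # with the final expression added on last.
--     for p, prop in enumerate(propositions):
--         truth_table[prop] = []
--         ts_or_fs = 2**(power - p - 1)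
--         oscs = list(range(2**(p + 1)))
--         for osc in oscs:
--             if osc % 2 == 0:
--                 truth_table[prop].extend([True] * ts_or_fs)
--             else:
--                 truth_table[prop].extend([False] * ts_or_fs)
--     return truth_table, total_truth_values
-- ===== SOURCE B (Python) =====
-- from collections import OrderedDict
--
--
-- def create_truth_value_arrays(propositions):
--     # Row-major: materialise all rows in one pass over row indices (each cell is a bit of the
--     # row index), then wire column p to proposition p.
--     power = len(propositions)
--     total_truth_values = 2 ** power
--     rows = [[(i >> (power - p - 1)) & 1 == 0 for p in range(power)] for i in range(total_truth_values)]
--     truth_table = OrderedDict()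
--     for p, prop in enumerate(propositions):
--         truth_table[prop] = [row[p] for row in rows]
--     return truth_table, total_truth_values
-- ===== Notes on version B (the rewrite author's own statement) =====
-- stated objective: alternative
-- what changed: B builds the table row-major in a single pass over row indices, computing each cell from a bit of the row index ((i >> (power-p-1)) & 1 == 0), then wires column p to proposition p, instead of A's column-by-column extension of alternating True/False runs.
import Mathlib
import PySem

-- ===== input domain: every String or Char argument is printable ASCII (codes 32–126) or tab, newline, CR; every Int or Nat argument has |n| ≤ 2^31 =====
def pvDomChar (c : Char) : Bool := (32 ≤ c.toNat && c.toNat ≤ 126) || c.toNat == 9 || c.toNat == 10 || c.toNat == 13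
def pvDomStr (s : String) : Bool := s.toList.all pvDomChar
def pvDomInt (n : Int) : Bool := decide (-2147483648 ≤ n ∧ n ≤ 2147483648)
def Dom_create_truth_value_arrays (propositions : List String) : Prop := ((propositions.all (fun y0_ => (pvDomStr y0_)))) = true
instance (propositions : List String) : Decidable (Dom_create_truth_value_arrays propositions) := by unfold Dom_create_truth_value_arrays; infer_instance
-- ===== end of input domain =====

-- B builds the truth table row-major (one pass over row indices, each cell computed from a
-- bit of the index) instead of A's column-by-column extension of alternating runs.


-- ===== PORT A =====
-- [True] * ts_or_fs / [False] * ts_or_fs chosen by osc % 2 == 0 (osc ≥ 0, so Nat % is exact)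
def pvBlockA (ts_or_fs : Nat) (osc : Nat) : List (Option Bool) :=
  if osc % 2 == 0 then List.replicate ts_or_fs (some true) else List.replicate ts_or_fs (some false)

-- body of A's outer loop for one (prop, p) pair (indices from enumerate are ≥ 0: Nat)
def pvStepA (power : Nat) (d : PySem.Dict String (List (Option Bool))) (x : String × Nat) :
    PySem.Dict String (List (Option Bool)) :=
  let d := d.insert x.1 []
  let ts_or_fs := 2 ^ (power - x.2 - 1)
  let oscs := List.range (2 ^ (x.2 + 1))     -- list(range(2**(p+1))): nonnegative, List.range is exact
  oscs.foldl (fun d osc => d.modify x.1 [] (fun l => l ++ pvBlockA ts_or_fs osc)) d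

def create_truth_value_arrays (propositions : List String) : (List (String × List (Option Bool))) × Int :=
  let power := propositions.length
  let total_truth_values : Int := 2 ^ power
  let truth_table := propositions.zipIdx.foldl (pvStepA power) PySem.Dict.empty   -- enumerate(propositions)
  (truth_table.items, total_truth_values)

-- ===== PORT B =====
-- (i >> (power - p - 1)) & 1 == 0 — all quantities nonnegative, so Nat shift/and are exact
def pvCellB (power p i : Nat) : Option Bool :=
  some ((i >>> (power - p - 1)) &&& 1 == 0)

def create_truth_value_arrays_alt (propositions : List String) : (List (String × List (Option Bool))) × Int :=
  let power := propositions.length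
  let total_truth_values : Int := 2 ^ power
  -- rows = [[cell for p in range(power)] for i in range(total)]; ranges are nonnegative, List.range is exact
  let rows := (List.range (2 ^ power)).map (fun i => (List.range power).map (fun p => pvCellB power p i))
  -- row[p]: p < power = row length always, so the getD default is never read
  let truth_table := propositions.zipIdx.foldl
    (fun d x => d.insert x.1 (rows.map (fun row => row.getD x.2 (some false)))) PySem.Dict.empty   -- enumerate(propositions)
  (truth_table.items, total_truth_values)

-- ===== PRECONDITION & SPEC =====
def Spec_create_truth_value_arrays (propositions : List String) (out : (List (String × List (Option Bool))) × Int) : Prop := out = create_truth_value_arrays_alt propositions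
instance (propositions : List String) (out : (List (String × List (Option Bool))) × Int) : Decidable (Spec_create_truth_value_arrays propositions out) := by unfold Spec_create_truth_value_arrays; infer_instance

-- ===== CLAIM (what is proved, stated in full; the proofs are below) =====
def Claim_equal_create_truth_value_arrays : Prop := ∀ (propositions : List String), Dom_create_truth_value_arrays propositions → Spec_create_truth_value_arrays propositions (create_truth_value_arrays propositions)

-- ===== LEMMAS AND PROOFS =====

-- the truth-value column of proposition p, as B computes it
def pvColB (power p : Nat) : List (Option Bool) :=
  (List.range (2 ^ power)).map (pvCellB power p)

-- flatMap of constant blocks is a division-indexed map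
lemma pv_flatMap_replicate (g : Nat → Option Bool) (a b : Nat) (hb : 0 < b) :
    (List.range a).flatMap (fun q => List.replicate b (g q)) =
      (List.range (a * b)).map (fun k => g (k / b)) := by
  induction a with
  | zero => simp
  | succ n ih =>
      rw [List.range_succ, Nat.succ_mul, List.range_add]
      simp only [List.flatMap_append, ih, List.map_append, List.map_map]
      congr 1
      have : List.map ((fun k => g (k / b)) ∘ fun x => n * b + x) (List.range b)
          = List.replicate b (g n) := by
        rw [List.eq_replicate_iff]
        refine ⟨by simp, ?_⟩
        intro v hv
        simp only [List.mem_map, List.mem_range, Function.comp] at hv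
        obtain ⟨r, hr, rfl⟩ := hv
        have : (n * b + r) / b = n := by
          rw [Nat.mul_comm, Nat.mul_add_div hb, Nat.div_eq_of_lt hr]; omega
        rw [this]
      rw [this]; simp

-- A's column equals B's column, for p < power
lemma pv_colA_eq_colB (power p : Nat) (hp : p < power) :
    (List.range (2 ^ (p + 1))).flatMap (pvBlockA (2 ^ (power - p - 1))) = pvColB power p := by
  have hblock : pvBlockA (2 ^ (power - p - 1)) =
      fun osc => List.replicate (2 ^ (power - p - 1)) (some (osc % 2 == 0)) := by
    funext osc
    by_cases h : osc % 2 == 0 <;> simp [pvBlockA, h]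
  rw [hblock, pv_flatMap_replicate _ _ _ (by positivity),
    show 2 ^ (p + 1) * 2 ^ (power - p - 1) = 2 ^ power by
      rw [← pow_add]; congr 1; omega]
  unfold pvColB pvCellB
  apply List.map_congr_left
  intro k _
  rw [Nat.shiftRight_eq_div_pow, Nat.and_one_is_mod]

-- Dict.modify at a present key is an insert (PySem.Dict.modify is defined that way)
lemma pv_modify_eq_insert (d : PySem.Dict String (List (Option Bool))) (k : String)
    (d0 : List (Option Bool)) (f : List (Option Bool) → List (Option Bool)) :
    d.modify k d0 f = d.insert k (f (d.getD k d0)) := rfl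

-- A's run of modifies at one key collapses to a single insert of the accumulated column
lemma pv_modify_chain (l : List Nat) (d : PySem.Dict String (List (Option Bool))) (k : String)
    (ts : Nat) (v : List (Option Bool)) :
    l.foldl (fun d osc => d.modify k [] (fun w => w ++ pvBlockA ts osc)) (d.insert k v) =
      d.insert k (v ++ l.flatMap (pvBlockA ts)) := by
  induction l generalizing v with
  | nil => simp
  | cons x xs ih =>
      simp only [List.foldl_cons, List.flatMap_cons]
      rw [pv_modify_eq_insert, PySem.Dict.getD_insert_self, PySem.Dict.insert_insert_self,
        ih, List.append_assoc]

-- A's loop body for one (prop, p) is one insert of A's whole column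
lemma pv_stepA_insert (power : Nat) (d : PySem.Dict String (List (Option Bool)))
    (x : String × Nat) :
    pvStepA power d x =
      d.insert x.1 ((List.range (2 ^ (x.2 + 1))).flatMap (pvBlockA (2 ^ (power - x.2 - 1)))) := by
  unfold pvStepA
  rw [pv_modify_chain]
  simp

-- reading column p out of B's row-major table gives B's column, for p < power
lemma pv_rowsB_getD (power p : Nat) (hp : p < power) :
    ((List.range (2 ^ power)).map (fun i => (List.range power).map (fun q => pvCellB power q i))).map
      (fun row => row.getD p (some false)) = pvColB power p := by
  unfold pvColB
  rw [List.map_map]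
  apply List.map_congr_left
  intro i _
  simp only [Function.comp]
  rw [List.getD_eq_getElem _ _ (by simpa using hp)]
  simp

-- ===== VERDICT (by name: the statement is the Claim_ definition above) =====
theorem create_truth_value_arrays_spec : Claim_equal_create_truth_value_arrays := by
  intro props _
  unfold Spec_create_truth_value_arrays create_truth_value_arrays create_truth_value_arrays_alt
  dsimp only
  simp only [Prod.mk.injEq, and_true]
  congr 1
  apply PySem.List.foldl_congr_mem
  intro acc x hx
  obtain ⟨s, p⟩ := x
  have hp : p < props.length := ((List.mem_zipIdx hx).2.1).trans_eq (by omega)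
  rw [pv_stepA_insert, pv_colA_eq_colB _ _ hp, ← pv_rowsB_getD _ _ hp]
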